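-- pv_equiv track=rewrite | github.com/world-dv/Python_Programmers | Lv1/연습문제/NumberPair.py | solution
-- ===== SOURCE A (Python) =====
-- def solution(X, Y):
--     answer = ''
--     x = list(set(X))
--     y = list(set(Y))
--     arr = [[i, min(X.count(i), Y.count(i))] for i in x if i in y]
--     if len(arr) == 1 and arr[0][0] == '0':
--         return '0'
--     for i, j in sorted(arr, reverse=True):
--         answer += i * j
--     return answer if answer != '' else '-1'
-- ===== SOURCE B (Python) =====
-- def solution(X, Y):
--     xs = sorted(X, reverse=True)
--     ys = sorted(Y, reverse=True)
--     res = []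
--     i = j = 0
--     while i < len(xs) and j < len(ys):
--         if xs[i] == ys[j]:
--             res.append(xs[i])
--             i += 1
--             j += 1
--         elif xs[i] > ys[j]:
--             i += 1
--         else:
--             j += 1
--     if not res:
--         return '-1'
--     if all(c == '0' for c in res):
--         return '0'
--     return ''.join(res)
-- ===== Notes on version B (the rewrite author's own statement) =====
-- stated objective: alternative
-- what changed: Replaces per-distinct-character counting (set + repeated str.count + sort of [char,count] pairs) by a two-pointer merge of the two descending-sorted character lists, which yields the common multiset already in descending order; the '0'-only case is recast as 'result is nonempty and all zeros'.
import Mathlib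
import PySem

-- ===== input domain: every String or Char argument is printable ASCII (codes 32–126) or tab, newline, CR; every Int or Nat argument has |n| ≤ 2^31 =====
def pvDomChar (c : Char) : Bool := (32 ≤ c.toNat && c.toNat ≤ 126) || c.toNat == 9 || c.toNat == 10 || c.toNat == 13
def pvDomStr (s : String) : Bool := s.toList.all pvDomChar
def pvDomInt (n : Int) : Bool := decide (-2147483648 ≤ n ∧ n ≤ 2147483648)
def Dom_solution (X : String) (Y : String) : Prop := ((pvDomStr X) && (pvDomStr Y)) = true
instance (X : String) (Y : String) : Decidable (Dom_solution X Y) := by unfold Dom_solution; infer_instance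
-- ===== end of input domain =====

-- B replaces A's per-distinct-character counting (set + str.count + sort of pairs) by a
-- two-pointer merge of the two descending-sorted character lists (objective: alternative).

-- ===== PORT A =====
def solution (X : String) (Y : String) : String :=
  let x : PySem.Set Char := PySem.Set.ofList X.toList      -- x = list(set(X))
  let y : PySem.Set Char := PySem.Set.ofList Y.toList      -- y = list(set(Y))
  -- arr = [[i, min(X.count(i), Y.count(i))] for i in x if i in y]
  let arr : List (Char × Int) :=
    (x.filter (fun c => PySem.Set.contains y c)).map
      (fun c => (c, min ((PySem.Chars.count X.toList [c] : Nat) : Int)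
                       ((PySem.Chars.count Y.toList [c] : Nat) : Int)))
  if arr.length = 1 ∧ arr.head?.map Prod.fst = some '0' then "0"
  else
    -- for i, j in sorted(arr, reverse=True): answer += i * j
    let answer : List Char :=
      (PySem.List.sorted arr (fun p => toLex p) true).foldl
        (fun acc p => acc ++ PySem.List.pyRepeat [p.1] p.2) []
    if answer ≠ [] then String.ofList answer else "-1"

-- ===== PORT B =====
def mergeCommon : List Char → List Char → List Char
  | [], _ => []
  | _ :: _, [] => []
  | a :: as, b :: bs =>
    if a = b then a :: mergeCommon as bs
    else if b < a then mergeCommon as (b :: bs)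
    else mergeCommon (a :: as) bs
termination_by xs ys => xs.length + ys.length

def solution_alt (X : String) (Y : String) : String :=
  let xs := PySem.List.sorted X.toList (fun c => c) true
  let ys := PySem.List.sorted Y.toList (fun c => c) true
  let res := mergeCommon xs ys
  if res = [] then "-1"
  else if res.all (fun c => c == '0') then "0"
  else String.ofList res

-- ===== PRECONDITION & SPEC =====
def Spec_solution (X : String) (Y : String) (out : String) : Prop := out = solution_alt X Y
instance (X : String) (Y : String) (out : String) : Decidable (Spec_solution X Y out) := by unfold Spec_solution; infer_instance

-- ===== CLAIM (what is proved, stated in full; the proofs are below) =====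
def Claim_equal_solution : Prop := ∀ (X : String) (Y : String), Dom_solution X Y → Spec_solution X Y (solution X Y)


-- ===== LEMMAS AND PROOFS =====

-- str.count with a single-character needle is the character count
theorem countGo_singleton (c : Char) : ∀ (s : List Char) (acc : Nat),
    PySem.Chars.count.go [c] s.length s acc = acc + List.count c s
  | [], acc => by simp [PySem.Chars.count.go]
  | h :: t, acc => by
    show PySem.Chars.count.go [c] (t.length + 1) (h :: t) acc = _
    rw [PySem.Chars.count.go]
    by_cases hc : c = h
    · subst hc
      simp [List.isPrefixOf, countGo_singleton c t (acc + 1)]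
      omega
    · simp [List.isPrefixOf, beq_iff_eq, hc, countGo_singleton c t acc, Ne.symm hc]

theorem chars_count_singleton (s : List Char) (c : Char) :
    PySem.Chars.count s [c] = List.count c s := by
  simpa [PySem.Chars.count] using countGo_singleton c s 0

-- the merge only picks elements of its first argument
theorem merge_sublist : ∀ (xs ys : List Char), (mergeCommon xs ys).Sublist xs := by
  intro xs ys
  induction xs, ys using mergeCommon.induct with
  | case1 ys => simp [mergeCommon]
  | case2 a as => simp [mergeCommon]
  | case3 as b bs ih => simpa [mergeCommon] using ih.cons₂ b
  | case4 a as b bs hne hlt ih => simpa [mergeCommon, hne, hlt] using ih.cons a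
  | case5 a as b bs hne hnlt ih => simpa [mergeCommon, hne, hnlt] using ih

-- every element of a descending list is at most its head
theorem le_head_of_pairwise_desc {b : Char} {bs : List Char} {v : Char}
    (hy : (b :: bs).Pairwise (fun a b => b ≤ a)) (hv : v ∈ b :: bs) : v ≤ b := by
  rcases List.mem_cons.mp hv with h | h
  · exact le_of_eq h
  · exact (List.pairwise_cons.mp hy).1 v h

-- on descending inputs the merge realises the min-count intersection
theorem merge_count : ∀ (xs ys : List Char),
    xs.Pairwise (fun a b => b ≤ a) → ys.Pairwise (fun a b => b ≤ a) → ∀ (v : Char),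
    List.count v (mergeCommon xs ys) = min (List.count v xs) (List.count v ys) := by
  intro xs ys hx hy
  induction xs, ys using mergeCommon.induct with
  | case1 ys => simp [mergeCommon]
  | case2 a as => simp [mergeCommon]
  | case3 as b bs ih =>
    intro v
    by_cases hv : v = b
    · subst hv
      have h := ih hx.of_cons hy.of_cons v
      simp only [mergeCommon, List.count_cons]
      simp
      omega
    · have h := ih hx.of_cons hy.of_cons v
      simp [mergeCommon, h, Ne.symm hv]
  | case4 a as b bs hne hlt ih =>
    intro v
    have h := ih hx.of_cons hy v
    by_cases hv : v = a
    · subst hv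
      have hnm : v ∉ b :: bs := fun hm => absurd (le_head_of_pairwise_desc hy hm) (not_le.mpr hlt)
      have h0 : List.count v (b :: bs) = 0 := List.count_eq_zero.mpr hnm
      simp [mergeCommon, hne, hlt, h, h0]
    · simp [mergeCommon, hne, hlt, h, Ne.symm hv]
  | case5 a as b bs hne hnlt ih =>
    intro v
    have hlt : a < b := lt_of_le_of_ne (not_lt.mp hnlt) hne
    have h := ih hx hy.of_cons v
    by_cases hv : v = b
    · subst hv
      have hnm : v ∉ a :: as := fun hm => absurd (le_head_of_pairwise_desc hx hm) (not_le.mpr hlt)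
      have h0 : List.count v (a :: as) = 0 := List.count_eq_zero.mpr hnm
      simp [mergeCommon, hne, hnlt, h, h0]
    · simp [mergeCommon, hne, hnlt, h, Ne.symm hv]

-- counting inside a flatMap of replicate-blocks
theorem count_flatMap_replicate (l : List (Char × Int)) (v : Char) :
    List.count v (l.flatMap (fun p => List.replicate p.2.toNat p.1))
      = (l.map (fun p => if p.1 = v then p.2.toNat else 0)).sum := by
  induction l with
  | nil => simp
  | cons p t ih =>
    by_cases h : p.1 = v <;>
      simp [List.count_append, ih, List.count_replicate, h]

-- summing an indicator over a duplicate-free list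
theorem sum_map_ite_nodup (l : List Char) (hl : l.Nodup) (f : Char → Nat) (v : Char) :
    (l.map (fun c => if c = v then f c else 0)).sum = if v ∈ l then f v else 0 := by
  induction l with
  | nil => simp
  | cons a t ih =>
    by_cases h : a = v
    · subst h
      have hnm : a ∉ t := (List.nodup_cons.mp hl).1
      have hz : (t.map (fun c => if c = a then f c else 0)).sum = 0 := by
        rw [ih (List.nodup_cons.mp hl).2]
        simp [hnm]
      simp [hz]
    · simp [h, ih (List.nodup_cons.mp hl).2, Ne.symm h]

-- elements of the flatMap are first components of list entries
theorem mem_flatMap_replicate {l : List (Char × Int)} {a : Char}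
    (h : a ∈ l.flatMap (fun p => List.replicate p.2.toNat p.1)) : ∃ p ∈ l, p.1 = a := by
  obtain ⟨p, hp, hmem⟩ := List.mem_flatMap.mp h
  exact ⟨p, hp, (List.eq_of_mem_replicate hmem).symm⟩

-- a flatMap of replicate-blocks over key-descending pairs is descending
theorem pairwise_flatMap_replicate (l : List (Char × Int))
    (hl : l.Pairwise (fun p q => q.1 ≤ p.1)) :
    (l.flatMap (fun p => List.replicate p.2.toNat p.1)).Pairwise (fun a b => b ≤ a) := by
  induction l with
  | nil => simp
  | cons p t ih =>
    rw [List.flatMap_cons]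
    refine List.pairwise_append.mpr ⟨?_, ih hl.of_cons, ?_⟩
    · exact List.pairwise_replicate.mpr (Or.inr le_rfl)
    · intro x hx y hy
      obtain ⟨q, hq, hqy⟩ := mem_flatMap_replicate hy
      rw [List.eq_of_mem_replicate hx, ← hqy]
      exact (List.pairwise_cons.mp hl).1 q hq

-- the distinct common characters, Python's [i for i in set(X) if i in set(Y)]
theorem mem_commons {cs ds : List Char} {c : Char} :
    c ∈ (PySem.Set.ofList cs).filter (fun c => PySem.Set.contains (PySem.Set.ofList ds) c)
      ↔ c ∈ cs ∧ c ∈ ds := by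
  simp [List.mem_filter, PySem.Set.mem_ofList, PySem.Set.contains]

theorem nodup_commons (cs ds : List Char) :
    ((PySem.Set.ofList cs).filter
      (fun c => PySem.Set.contains (PySem.Set.ofList ds) c)).Nodup :=
  (PySem.Set.nodup_ofList cs).filter _


-- ===== VERDICT (by name: the statement is the Claim_ definition above) =====
theorem solution_spec : Claim_equal_solution := by
  intro X Y _
  show solution X Y = solution_alt X Y
  simp only [solution, solution_alt]
  generalize X.toList = cs
  generalize Y.toList = ds
  set commons : List Char :=
    (PySem.Set.ofList cs).filter (fun c => PySem.Set.contains (PySem.Set.ofList ds) c)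
    with hcom
  set g : Char → Char × Int := fun c =>
    (c, min ((PySem.Chars.count cs [c] : Nat) : Int) ((PySem.Chars.count ds [c] : Nat) : Int))
    with hg
  set arr : List (Char × Int) := commons.map g with harr
  set m : Char → Nat := fun v => min (List.count v cs) (List.count v ds) with hm
  set xs : List Char := PySem.List.sorted cs (fun c => c) true with hxs
  set ys : List Char := PySem.List.sorted ds (fun c => c) true with hys
  set res : List Char := mergeCommon xs ys with hres
  set sarr : List (Char × Int) := PySem.List.sorted arr (fun p => toLex p) true with hsarr
  set L : List Char := sarr.flatMap (fun p => List.replicate p.2.toNat p.1) with hL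
  -- the loop builds the flatMap of replicate blocks
  have hfold : sarr.foldl (fun acc p => acc ++ PySem.List.pyRepeat [p.1] p.2) [] = L := by
    rw [PySem.List.foldl_append_eq_flatMap]
    simp [hL, PySem.List.pyRepeat_singleton]
  -- counts of A's answer
  have hcount : ∀ v, List.count v L = m v := by
    intro v
    rw [hL, count_flatMap_replicate]
    rw [List.Perm.sum_eq ((PySem.List.sorted_perm arr (fun p => toLex p) true).map
      (fun p => if p.1 = v then p.2.toNat else 0))]
    have hmap : arr.map (fun p => if p.1 = v then p.2.toNat else 0)
        = commons.map (fun c => if c = v then m c else 0) := by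
      rw [harr, List.map_map]
      refine List.map_congr_left ?_
      intro c _
      simp only [Function.comp, hg, hm, chars_count_singleton, ← Nat.cast_min, Int.toNat_natCast]
    rw [hmap, sum_map_ite_nodup commons (nodup_commons cs ds) m v]
    by_cases hv : v ∈ commons
    · simp [hv]
    · have := (not_iff_not.mpr (mem_commons (cs := cs) (ds := ds) (c := v))).mp (hcom ▸ hv)
      have hz : m v = 0 := by
        rcases not_and_or.mp this with h | h <;>
          simp [hm, List.count_eq_zero.mpr h]
      simp [hv, hz]
  -- counts of B's merge
  have hxp : xs.Pairwise (fun a b => b ≤ a) := by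
    simpa using PySem.List.sorted_pairwise_rev cs (fun c => c)
  have hyp : ys.Pairwise (fun a b => b ≤ a) := by
    simpa using PySem.List.sorted_pairwise_rev ds (fun c => c)
  have hrescount : ∀ v, List.count v res = m v := by
    intro v
    rw [hres, merge_count xs ys hxp hyp v, hxs, hys,
      (PySem.List.sorted_perm cs (fun c => c) true).count_eq,
      (PySem.List.sorted_perm ds (fun c => c) true).count_eq]
  -- A's answer is descending
  have hLpair : L.Pairwise (fun a b => b ≤ a) := by
    refine pairwise_flatMap_replicate sarr ?_
    refine (PySem.List.sorted_pairwise_rev arr (fun p => toLex p)).imp ?_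
    intro a b h
    rcases Prod.Lex.le_iff.mp h with h' | ⟨h', _⟩
    · exact le_of_lt h'
    · exact le_of_eq h'
  have hrespair : res.Pairwise (fun a b => b ≤ a) :=
    List.Pairwise.sublist (merge_sublist xs ys) hxp
  -- hence the two strings coincide
  have hLres : L = res :=
    (List.perm_iff_count.mpr (fun v => by rw [hcount v, hrescount v])).eq_of_pairwise
      (fun a b _ _ h1 h2 => le_antisymm h2 h1) hLpair hrespair
  -- membership in the merge = being a common character
  have hmemres : ∀ v, v ∈ res ↔ v ∈ cs ∧ v ∈ ds := by
    intro v
    rw [← List.count_pos_iff, hrescount v, hm]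
    simp only [lt_min_iff, List.count_pos_iff]
  -- A's special-case test = "nonempty and all zeros"
  have hcondA : (arr.length = 1 ∧ arr.head?.map Prod.fst = some '0')
      ↔ (res ≠ [] ∧ ∀ c ∈ res, c = '0') := by
    have hcr : ∀ v, v ∈ commons ↔ v ∈ res := fun v => by
      rw [hcom, mem_commons, hmemres]
    constructor
    · rintro ⟨hlen, hhead⟩
      rw [harr, List.length_map] at hlen
      obtain ⟨c, hc⟩ := List.length_eq_one_iff.mp hlen
      rw [harr, hc] at hhead
      simp [hg] at hhead
      subst hhead
      have h0 : '0' ∈ res := (hcr '0').mp (by rw [hc]; exact List.mem_singleton_self _)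
      refine ⟨List.ne_nil_of_mem h0, fun v hv => ?_⟩
      have : v ∈ commons := (hcr v).mpr hv
      rw [hc] at this
      exact List.mem_singleton.mp this
    · rintro ⟨hne, hall⟩
      obtain ⟨v, hv⟩ := List.exists_mem_of_ne_nil res hne
      have hvc : v ∈ commons := (hcr v).mpr hv
      have hallc : ∀ c ∈ commons, c = '0' := fun c hcm => hall c ((hcr c).mp hcm)
      have hcomeq : commons = ['0'] := by
        cases hcm : commons with
        | nil => rw [hcm] at hvc; cases hvc
        | cons a t =>
          have hnd := nodup_commons cs ds
          rw [← hcom, hcm] at hnd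
          have ha : a = '0' := hallc a (hcm ▸ List.mem_cons_self)
          have ht : t = [] := by
            rw [List.eq_nil_iff_forall_not_mem]
            intro x hx
            have hx0 : x = '0' := hallc x (hcm ▸ List.mem_cons_of_mem a hx)
            exact (List.nodup_cons.mp hnd).1 (by rw [ha, ← hx0]; exact hx)
          rw [ha, ht]
      refine ⟨by rw [harr, hcomeq]; rfl, by rw [harr, hcomeq]; simp [hg]⟩
  -- assemble the branches
  rw [hfold, hLres]
  have hallb : (res.all (fun c => c == '0') = true) ↔ ∀ c ∈ res, c = '0' := by
    simp [List.all_eq_true]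
  by_cases hA : arr.length = 1 ∧ Option.map Prod.fst arr.head? = some '0'
  · obtain ⟨hne, hall⟩ := hcondA.mp hA
    rw [if_pos hA, if_neg hne, if_pos (hallb.mpr hall)]
  · rw [if_neg hA]
    by_cases hE : res = []
    · rw [if_pos hE, if_neg (by simpa using hE)]
    · have hallf : ¬(res.all (fun c => c == '0') = true) := fun h =>
        hA (hcondA.mpr ⟨hE, hallb.mp h⟩)
      rw [if_neg hE, if_neg hallf, if_pos hE]
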